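-- pv_equiv track=rewrite | github.com/progval/PyCorewar | corewar/__init__.py | __get_expression
-- ===== SOURCE A (Python) =====
-- class WarriorParseError(Exception):
--     """Exception for indicating problems while parsing warriors."""
--
--     msg = ''
--     line = 0
--
--     def __init__(self, msg, line):
--         """Set attributes of Exception."""
--
--         self.msg = msg
--         self.line = line
--
--     def __str__(self):
--         return 'Parse error in line %d: %s' % (self.line, self.msg)
--
-- def __get_expression(line, pos, validChars, lineNum):
--     """Try to extract an expression from line (starting with pos-th
--     caracter). Check, that only valid characters are used. Skip all
--     whitespaces."""
--
--     expr = ''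
--     while pos < len(line):
--         char = line[pos]
--         pos += 1
--         if char.isspace():
--             continue
--         if not char in validChars:
--             raise WarriorParseError('Invalid character \'%s\'' % char,
--                                       lineNum)
--         expr += char
--
--     return expr
-- ===== SOURCE B (Python) =====
-- class WarriorParseError(Exception):
--     """Exception for indicating problems while parsing warriors."""
--
--     msg = ''
--     line = 0
--
--     def __init__(self, msg, line):
--         self.msg = msg
--         self.line = line
--
--     def __str__(self):
--         return 'Parse error in line %d: %s' % (self.line, self.msg)
--
--
-- def __get_expression(line, pos, validChars, lineNum):
--     """Two-pass version: first strip all whitespace from line[pos:],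
--     then validate the remaining characters in order."""
--
--     filtered = ''.join(c for c in line[pos:] if not c.isspace())
--     for c in filtered:
--         if c not in validChars:
--             raise WarriorParseError('Invalid character \'%s\'' % c, lineNum)
--     return filtered
-- ===== Notes on version B (the rewrite author's own statement) =====
-- stated objective: faster
-- what changed: replaces A's single index-driven while-loop that interleaves whitespace skipping, validation and quadratic string accumulation (expr += char) with a two-pass pipeline: slice line[pos:] and join-filter the whitespace away in one linear pass, then validate the filtered string in a separate pass
-- intended difference: For negative pos on which A still returns (-len(line) <= pos and every non-whitespace character of line is valid), Python's negative indexing makes A's while-loop scan line[len+pos:] and then the entire line again, so A returns the stripped tail concatenated with the whole stripped line; B returns just the stripped tail line[pos:], which is the intended expression. — e.g. on __get_expression("a", -1, "a", 1): A returns "aa", B returns "a"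
import Mathlib
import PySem

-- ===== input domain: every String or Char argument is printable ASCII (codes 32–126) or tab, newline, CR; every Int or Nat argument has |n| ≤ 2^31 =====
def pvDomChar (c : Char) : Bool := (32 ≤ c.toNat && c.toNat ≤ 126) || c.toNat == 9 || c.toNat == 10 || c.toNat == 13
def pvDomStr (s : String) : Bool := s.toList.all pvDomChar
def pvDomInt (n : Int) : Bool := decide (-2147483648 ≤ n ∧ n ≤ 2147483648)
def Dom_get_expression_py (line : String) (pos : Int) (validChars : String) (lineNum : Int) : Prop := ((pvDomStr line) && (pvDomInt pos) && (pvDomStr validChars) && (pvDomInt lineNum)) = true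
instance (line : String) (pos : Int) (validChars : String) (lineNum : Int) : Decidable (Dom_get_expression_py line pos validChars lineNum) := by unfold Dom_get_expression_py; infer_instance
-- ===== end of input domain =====

-- B replaces A's single index-driven while-loop (skip/validate + quadratic `expr += char`) by a
-- two-pass pipeline (join-filter whitespace out of line[pos:], then validate); measured faster.
-- Where its Python raises (WarriorParseError / IndexError), a port returns "" (excluded by Pre_).

-- ===== PORT A =====
-- A's while-loop; `none` = a raise (IndexError from line[pos], or WarriorParseError).
-- `c ∈ valid` ports `char in validChars` exactly: for a single character, Python substring
-- containment is exactly membership of that character.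
def pvALoop (cs : List Char) (pos : Int) (valid : List Char) (expr : List Char) : Option (List Char) :=
  if _h : pos < (cs.length : Int) then
    match PySem.List.pyGet? cs pos with
    | none => none
    | some c =>
      if PySem.Chars.isspace c then pvALoop cs (pos + 1) valid expr
      else if ¬ (c ∈ valid) then none
      else pvALoop cs (pos + 1) valid (expr ++ [c])
  else some expr
termination_by ((cs.length : Int) - pos).toNat
decreasing_by all_goals omega

def get_expression_py (line : String) (pos : Int) (validChars : String) (_lineNum : Int) : String :=
  ((pvALoop line.toList pos validChars.toList []).map String.ofList).getD ""

-- ===== PORT B =====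
def get_expression_py_alt (line : String) (pos : Int) (validChars : String) (_lineNum : Int) : String :=
  let filtered := (PySem.List.slice line.toList (some pos) none).filter (fun c => ¬ PySem.Chars.isspace c)
  match filtered.find? (fun c => ¬ (c ∈ validChars.toList)) with
  | some _ => ""   -- WarriorParseError (excluded by Pre_)
  | none => String.ofList filtered

-- ===== PRECONDITION & SPEC =====
-- Pre_ = exactly the inputs on which the Python A returns normally: every non-whitespace character
-- A's scan visits is valid (for pos < 0 the wraparound scan visits the whole line, so all of line
-- must be valid), and for a negative pos the first access line[pos] must be in range (pos ≥ -len,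
-- else IndexError).
def Pre_get_expression_py (line : String) (pos : Int) (validChars : String) (lineNum : Int) : Prop :=
  if 0 ≤ pos then
    (line.toList.drop pos.toNat).all (fun c => PySem.Chars.isspace c || validChars.toList.contains c) = true
  else
    -(line.toList.length : Int) ≤ pos ∧
      line.toList.all (fun c => PySem.Chars.isspace c || validChars.toList.contains c) = true
instance (line : String) (pos : Int) (validChars : String) (lineNum : Int) : Decidable (Pre_get_expression_py line pos validChars lineNum) := by unfold Pre_get_expression_py; infer_instance

def pvWitness_get_expression_py : String × Int × String × Int := ("x 1", 0, "x1", 3)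

-- For negative pos on which A still returns, Python's negative indexing makes A's while-loop scan
-- line[len+pos:] and then the entire line again, so A returns the stripped tail concatenated with
-- the whole stripped line; B returns just the stripped tail line[pos:], the intended expression.
def D_get_expression_py (line : String) (pos : Int) (validChars : String) (lineNum : Int) : Prop :=
  pos < 0 ∧ line.toList.any (fun c => !PySem.Chars.isspace c) = true
instance (line : String) (pos : Int) (validChars : String) (lineNum : Int) : Decidable (D_get_expression_py line pos validChars lineNum) := by unfold D_get_expression_py; infer_instance

def Spec_get_expression_py (line : String) (pos : Int) (validChars : String) (lineNum : Int) (out : String) : Prop := ¬ D_get_expression_py line pos validChars lineNum → out = get_expression_py_alt line pos validChars lineNum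
instance (line : String) (pos : Int) (validChars : String) (lineNum : Int) (out : String) : Decidable (Spec_get_expression_py line pos validChars lineNum out) := by unfold Spec_get_expression_py; infer_instance

def pvDiffWitness_get_expression_py : String × Int × String × Int := ("a", -1, "a", 1)
def pvDiffWitnessOut_get_expression_py : String × String := ("aa", "a")

-- ===== CLAIM (what is proved, stated in full; the proofs are below) =====
def Claim_unchanged_get_expression_py : Prop := ∀ (line : String) (pos : Int) (validChars : String) (lineNum : Int), Dom_get_expression_py line pos validChars lineNum → Pre_get_expression_py line pos validChars lineNum → Spec_get_expression_py line pos validChars lineNum (get_expression_py line pos validChars lineNum)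
def Claim_changed_get_expression_py : Prop := Dom_get_expression_py (pvDiffWitness_get_expression_py.1) (pvDiffWitness_get_expression_py.2.1) (pvDiffWitness_get_expression_py.2.2.1) (pvDiffWitness_get_expression_py.2.2.2) ∧ Pre_get_expression_py (pvDiffWitness_get_expression_py.1) (pvDiffWitness_get_expression_py.2.1) (pvDiffWitness_get_expression_py.2.2.1) (pvDiffWitness_get_expression_py.2.2.2) ∧ D_get_expression_py (pvDiffWitness_get_expression_py.1) (pvDiffWitness_get_expression_py.2.1) (pvDiffWitness_get_expression_py.2.2.1) (pvDiffWitness_get_expression_py.2.2.2) ∧ get_expression_py (pvDiffWitness_get_expression_py.1) (pvDiffWitness_get_expression_py.2.1) (pvDiffWitness_get_expression_py.2.2.1) (pvDiffWitness_get_expression_py.2.2.2) = pvDiffWitnessOut_get_expression_py.1 ∧ get_expression_py_alt (pvDiffWitness_get_expression_py.1) (pvDiffWitness_get_expression_py.2.1) (pvDiffWitness_get_expression_py.2.2.1) (pvDiffWitness_get_expression_py.2.2.2) = pvDiffWitnessOut_get_expression_py.2 ∧ pvDiffWitnessOut_get_expression_py.1 ≠ pvDiffWitnessOut_get_expression_p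y.2
def Claim_exact_get_expression_py : Prop := ∀ (line : String) (pos : Int) (validChars : String) (lineNum : Int), Dom_get_expression_py line pos validChars lineNum → Pre_get_expression_py line pos validChars lineNum → D_get_expression_py line pos validChars lineNum → get_expression_py line pos validChars lineNum ≠ get_expression_py_alt line pos validChars lineNum

-- ===== LEMMAS AND PROOFS =====

theorem pvALoop_nonneg (cs : List Char) (pos : Int) (valid : List Char) (expr : List Char) :
    0 ≤ pos →
    (∀ c ∈ cs.drop pos.toNat, PySem.Chars.isspace c = true ∨ c ∈ valid) →
    pvALoop cs pos valid expr
      = some (expr ++ (cs.drop pos.toNat).filter (fun c => ¬ PySem.Chars.isspace c)) := by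
  fun_induction pvALoop cs pos valid expr with
  | case1 pos expr h hget =>
    intro h0 _
    rw [PySem.List.pyGet?_of_nonneg cs h0] at hget
    have : pos.toNat < cs.length := by omega
    simp [List.getElem?_eq_getElem this] at hget
  | case2 pos expr h c hget hsp ih =>
    intro h0 hv
    have hlt : pos.toNat < cs.length := by omega
    rw [PySem.List.pyGet?_of_nonneg cs h0] at hget
    have hc : cs[pos.toNat] = c := by simpa [List.getElem?_eq_getElem hlt] using hget
    have hdrop : List.drop pos.toNat cs = c :: List.drop (pos.toNat + 1) cs := by
      rw [List.drop_eq_getElem_cons hlt, hc]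
    have hn : (pos + 1).toNat = pos.toNat + 1 := by omega
    rw [hn] at ih
    rw [ih (by omega) (fun x hx => hv x (by rw [hdrop]; exact List.mem_cons_of_mem _ hx))]
    rw [hdrop]
    simp [hsp]
  | case3 pos expr h c hget hsp hnv =>
    intro h0 hv
    have hlt : pos.toNat < cs.length := by omega
    rw [PySem.List.pyGet?_of_nonneg cs h0] at hget
    have hc : cs[pos.toNat] = c := by simpa [List.getElem?_eq_getElem hlt] using hget
    have hmem : c ∈ List.drop pos.toNat cs := by
      rw [List.drop_eq_getElem_cons hlt, hc]; exact List.mem_cons_self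
    rcases hv c hmem with h' | h' <;> simp_all
  | case4 pos expr h c hget hsp hnv ih =>
    intro h0 hv
    have hlt : pos.toNat < cs.length := by omega
    rw [PySem.List.pyGet?_of_nonneg cs h0] at hget
    have hc : cs[pos.toNat] = c := by simpa [List.getElem?_eq_getElem hlt] using hget
    have hdrop : List.drop pos.toNat cs = c :: List.drop (pos.toNat + 1) cs := by
      rw [List.drop_eq_getElem_cons hlt, hc]
    have hn : (pos + 1).toNat = pos.toNat + 1 := by omega
    rw [hn] at ih
    rw [ih (by omega) (fun x hx => hv x (by rw [hdrop]; exact List.mem_cons_of_mem _ hx))]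
    rw [hdrop]
    simp [hsp]
  | case5 pos expr h =>
    intro h0 _
    have : cs.length ≤ pos.toNat := by omega
    simp [List.drop_eq_nil_of_le this]

theorem pvALoop_neg (cs : List Char) (pos : Int) (valid : List Char) (expr : List Char) :
    -(cs.length : Int) ≤ pos → pos < 0 →
    (∀ c ∈ cs, PySem.Chars.isspace c = true ∨ c ∈ valid) →
    pvALoop cs pos valid expr
      = some (expr ++ (cs.drop ((cs.length : Int) + pos).toNat).filter (fun c => ¬ PySem.Chars.isspace c)
                   ++ cs.filter (fun c => ¬ PySem.Chars.isspace c)) := by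
  fun_induction pvALoop cs pos valid expr with
  | case1 pos expr h hget =>
    intro hlo hneg _
    rw [PySem.List.pyGet?_eq_none_iff] at hget
    exact absurd (by simp [PySem.Raise.InRange]; omega) hget
  | case2 pos expr h c hget hsp ih =>
    intro hlo hneg hv
    have hk : pos = -(((-pos).toNat : Nat) : Int) := by omega
    rw [hk, PySem.List.pyGet?_neg_natCast cs _ (by omega) (by omega)] at hget
    have hlt : cs.length - (-pos).toNat < cs.length := by omega
    have hc : cs[cs.length - (-pos).toNat] = c := by
      simpa [List.getElem?_eq_getElem hlt] using hget
    have hidx : ((cs.length : Int) + pos).toNat = cs.length - (-pos).toNat := by omega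
    have hdrop : List.drop ((cs.length : Int) + pos).toNat cs
        = c :: List.drop (((cs.length : Int) + (pos + 1)).toNat) cs := by
      rw [hidx, List.drop_eq_getElem_cons hlt, hc,
        show ((cs.length : Int) + (pos + 1)).toNat = cs.length - (-pos).toNat + 1 from by omega]
    rw [hdrop]
    by_cases hz : pos + 1 < 0
    · rw [ih (by omega) hz hv]
      simp [hsp]
    · have hz0 : pos + 1 = 0 := by omega
      rw [hz0] at *
      rw [pvALoop_nonneg cs 0 valid expr (le_refl 0) (by simpa using hv)]
      simp [hsp]
  | case3 pos expr h c hget hsp hnv =>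
    intro hlo hneg hv
    have hmem : c ∈ cs := PySem.List.mem_of_pyGet?_eq_some cs hget
    rcases hv c hmem with h' | h' <;> simp_all
  | case4 pos expr h c hget hsp hnv ih =>
    intro hlo hneg hv
    have hk : pos = -(((-pos).toNat : Nat) : Int) := by omega
    rw [hk, PySem.List.pyGet?_neg_natCast cs _ (by omega) (by omega)] at hget
    have hlt : cs.length - (-pos).toNat < cs.length := by omega
    have hc : cs[cs.length - (-pos).toNat] = c := by
      simpa [List.getElem?_eq_getElem hlt] using hget
    have hidx : ((cs.length : Int) + pos).toNat = cs.length - (-pos).toNat := by omega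
    have hdrop : List.drop ((cs.length : Int) + pos).toNat cs
        = c :: List.drop (((cs.length : Int) + (pos + 1)).toNat) cs := by
      rw [hidx, List.drop_eq_getElem_cons hlt, hc,
        show ((cs.length : Int) + (pos + 1)).toNat = cs.length - (-pos).toNat + 1 from by omega]
    rw [hdrop]
    by_cases hz : pos + 1 < 0
    · rw [ih (by omega) hz hv]
      simp [hsp]
    · have hz0 : pos + 1 = 0 := by omega
      rw [hz0] at *
      rw [pvALoop_nonneg cs 0 valid (expr ++ [c]) (le_refl 0) (by simpa using hv)]
      simp [hsp]
  | case5 pos expr h =>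
    intro hlo hneg _
    omega

-- B's validation pass finds nothing when every non-whitespace character is valid.
theorem pvB_find_none (l : List Char) (valid : List Char)
    (hv : ∀ c ∈ l, PySem.Chars.isspace c = true ∨ c ∈ valid) :
    (l.filter (fun c => ¬ PySem.Chars.isspace c)).find? (fun c => ¬ (c ∈ valid)) = none := by
  rw [List.find?_eq_none]
  intro c hc
  have hm := List.mem_of_mem_filter hc
  have hs := List.of_mem_filter hc
  rcases hv c hm with h | h
  · simp [h] at hs
  · simp [h]

-- Unpack the Bool-level validity check of Pre_ into the pointwise form the loop lemmas use.
theorem pv_all_valid {l v : List Char}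
    (h : l.all (fun c => PySem.Chars.isspace c || v.contains c) = true) :
    ∀ c ∈ l, PySem.Chars.isspace c = true ∨ c ∈ v := by
  intro c hc
  have := List.all_eq_true.mp h c hc
  simpa using this

-- ===== VERDICT (by name: the statement is the Claim_ definition above) =====
theorem get_expression_py_spec : Claim_unchanged_get_expression_py := by
  intro line pos validChars lineNum _hdom hpre hnd
  show get_expression_py line pos validChars lineNum = get_expression_py_alt line pos validChars lineNum
  simp only [get_expression_py, get_expression_py_alt]
  by_cases hp : 0 ≤ pos
  · rw [Pre_get_expression_py, if_pos hp] at hpre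
    have hv := pv_all_valid hpre
    rw [pvALoop_nonneg line.toList pos validChars.toList [] hp hv,
        PySem.List.slice_from line.toList hp,
        pvB_find_none _ _ hv]
    simp
  · rw [Pre_get_expression_py, if_neg hp] at hpre
    obtain ⟨hlo, hva⟩ := hpre
    have hv := pv_all_valid hva
    have hsp : ∀ c ∈ line.toList, PySem.Chars.isspace c = true := by
      intro c hc
      by_contra hns
      exact hnd ⟨by omega, List.any_eq_true.mpr ⟨c, hc, by simpa using hns⟩⟩
    rw [pvALoop_neg line.toList pos validChars.toList [] hlo (by omega) hv]
    have hfil : ∀ l : List Char, (∀ c ∈ l, PySem.Chars.isspace c = true) →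
        l.filter (fun c => ¬ PySem.Chars.isspace c) = [] := by
      intro l hl
      rw [List.filter_eq_nil_iff]
      intro c hc; simp [hl c hc]
    rw [hfil _ (fun c hc => hsp c (List.mem_of_mem_drop hc)), hfil _ hsp,
        hfil _ (fun c hc => hsp c (PySem.List.mem_of_mem_slice _ _ _ hc))]
    rfl

theorem get_expression_py_tight : Claim_exact_get_expression_py := by
  intro line pos validChars lineNum _hdom hpre hd
  obtain ⟨hneg, hany⟩ := hd
  obtain ⟨c0, hc0m, hc0s'⟩ := List.any_eq_true.mp hany
  have hc0s : PySem.Chars.isspace c0 = false := by simpa using hc0s'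
  rw [Pre_get_expression_py, if_neg (by omega)] at hpre
  obtain ⟨hlo, hva⟩ := hpre
  have hv := pv_all_valid hva
  simp only [get_expression_py, get_expression_py_alt]
  rw [pvALoop_neg line.toList pos validChars.toList [] hlo hneg hv]
  have hslice : PySem.List.slice line.toList (some pos) none
      = line.toList.drop ((line.toList.length : Int) + pos).toNat := by
    rw [PySem.List.slice_some_none]
    congr 1
    rw [show pos = -(((-pos).toNat : Nat) : Int) from by omega,
        PySem.List.clampIdx_neg_natCast _ _ (by omega)]
    omega
  rw [hslice, pvB_find_none _ _ (fun c hc => hv c (List.mem_of_mem_drop hc))]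
  intro heq
  have hlist := congrArg String.toList heq
  simp only [String.toList_ofList, Option.getD_some, Option.map_some, List.nil_append] at hlist
  have hne : line.toList.filter (fun c => ¬ PySem.Chars.isspace c) ≠ [] := by
    intro h0
    have := List.filter_eq_nil_iff.mp h0 c0 hc0m
    simp [hc0s] at this
  have hlen := congrArg List.length hlist
  rw [List.length_append] at hlen
  exact hne (List.length_eq_zero_iff.mp (by omega))

theorem get_expression_py_changed : Claim_changed_get_expression_py := by
  unfold Claim_changed_get_expression_py
  refine ⟨by decide, ?_, ?_, ?_, by decide, by decide⟩
  · show Pre_get_expression_py "a" (-1) "a" 1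
    rw [Pre_get_expression_py, if_neg (by decide)]
    exact ⟨by decide, by decide⟩
  · show D_get_expression_py "a" (-1) "a" 1
    exact ⟨by decide, by decide⟩
  · show get_expression_py "a" (-1) "a" 1 = "aa"
    simp only [get_expression_py]
    rw [pvALoop_neg _ _ _ _ (by decide) (by decide)
        (by rw [show "a".toList = ['a'] from by decide]; intro c hc; simp at hc; subst hc
            exact Or.inr (by decide))]
    decide
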